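-- pv_equiv track=rewrite | github.com/maafk/aoc-2022 | day06/index.py | act_on_line
-- ===== SOURCE A (Python) =====
-- from collections import deque
--
-- def act_on_line(line, non_repeating: int):
--     d = deque(maxlen=non_repeating)
--     for i, ch in enumerate(line):
--         d.append(ch)
--         d_as_list = list(d)
--         if len(d_as_list) < non_repeating:
--             continue
--         if len(d_as_list) > non_repeating:
--             d.popleft()
--         duplicates = [x for x in d_as_list if d_as_list.count(x) > 1]
--         if not duplicates:
--             return i + 1
-- ===== SOURCE B (Python) =====
-- def act_on_line(line, non_repeating: int):
--     n = non_repeating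
--     counts = {}
--     dup = 0  # number of distinct chars occurring >= 2 times in the current window
--     for i, ch in enumerate(line):
--         c = counts.get(ch, 0)
--         if c == 1:
--             dup += 1
--         counts[ch] = c + 1
--         if i >= n:
--             old = line[i - n]
--             c2 = counts[old]
--             if c2 == 2:
--                 dup -= 1
--             counts[old] = c2 - 1
--         if i + 1 >= n and dup == 0:
--             return i + 1
-- ===== Notes on version B (the rewrite author's own statement) =====
-- stated objective: faster
-- what changed: A rebuilds the deque window as a list at every position and scans it quadratically with list.count to find duplicates; B keeps a sliding-window character counter and an incrementally updated count of duplicated characters, checking a single integer per position.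
import Mathlib
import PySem

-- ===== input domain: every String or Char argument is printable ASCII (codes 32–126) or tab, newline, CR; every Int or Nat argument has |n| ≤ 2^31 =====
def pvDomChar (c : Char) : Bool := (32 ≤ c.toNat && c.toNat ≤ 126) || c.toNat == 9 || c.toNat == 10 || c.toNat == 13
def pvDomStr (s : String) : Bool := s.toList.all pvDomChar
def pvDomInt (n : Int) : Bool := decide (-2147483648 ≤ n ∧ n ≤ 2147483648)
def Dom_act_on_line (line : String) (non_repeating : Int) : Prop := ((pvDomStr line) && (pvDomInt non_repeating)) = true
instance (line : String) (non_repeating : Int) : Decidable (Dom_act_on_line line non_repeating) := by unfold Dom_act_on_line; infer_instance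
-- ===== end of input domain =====

-- B replaces A's per-position rebuild-and-scan of the deque window by a single pass with a
-- character counter and an incrementally maintained duplicate count (objective: faster).

-- ===== PORT A =====
-- loop body of A: d holds the deque's contents (deque(maxlen=n) discards from the left on append)
def pvALoop (n : Int) (d : List Char) : List (Int × Char) → Option Int
  | [] => none
  | (i, ch) :: rest =>
      let da := d ++ [ch]
      let dq := da.drop (da.length - n.toNat)    -- d.append(ch) under maxlen = n
      let dl := dq                                -- d_as_list = list(d)
      if PySem.List.len dl < n then pvALoop n dq rest
      else
        let dq2 := if PySem.List.len dl > n then dq.tail else dq   -- d.popleft() (never fires: maxlen already enforced)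
        let dups := dl.filter (fun x => PySem.List.count dl x > 1)
        if dups = [] then some (i + 1) else pvALoop n dq2 rest

def act_on_line (line : String) (non_repeating : Int) : Option Int :=
  pvALoop non_repeating [] (PySem.List.enumerate line.toList)

-- ===== PORT B =====
-- loop body of B: counts = occurrence counter of the current window, dup = number of distinct
-- chars occurring ≥ 2 times in it
def pvBLoop (cs : List Char) (n : Int) (counts : PySem.Dict Char Int) (dup : Int) :
    List (Int × Char) → Option Int
  | [] => none
  | (i, ch) :: rest =>
      let c := counts.getD ch 0
      let dup1 := if c = 1 then dup + 1 else dup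
      let counts1 := counts.insert ch (c + 1)
      let st :=
        if n ≤ i then
          let old := cs.getD (i - n).toNat ' '   -- line[i - n]; exact: 0 ≤ i - n < len cs in this branch under Pre_
          let c2 := counts1.getD old 0
          (counts1.insert old (c2 - 1), if c2 = 2 then dup1 - 1 else dup1)
        else (counts1, dup1)
      if n ≤ i + 1 ∧ st.2 = 0 then some (i + 1) else pvBLoop cs n st.1 st.2 rest

def act_on_line_alt (line : String) (non_repeating : Int) : Option Int :=
  pvBLoop line.toList non_repeating PySem.Dict.empty 0 (PySem.List.enumerate line.toList)

-- ===== PRECONDITION & SPEC =====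
-- Pre_ excludes only non_repeating < 0, where Python A raises ValueError (deque(maxlen=negative)).
def Pre_act_on_line (line : String) (non_repeating : Int) : Prop := 0 ≤ non_repeating
instance (line : String) (non_repeating : Int) : Decidable (Pre_act_on_line line non_repeating) := by unfold Pre_act_on_line; infer_instance

def pvWitness_act_on_line : String × Int := ("mjqjpqmgbljsphdztnvjfqwrcgsmlb", 4)

def Spec_act_on_line (line : String) (non_repeating : Int) (out : Option Int) : Prop := out = act_on_line_alt line non_repeating
instance (line : String) (non_repeating : Int) (out : Option Int) : Decidable (Spec_act_on_line line non_repeating out) := by unfold Spec_act_on_line; infer_instance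

-- ===== CLAIM (what is proved, stated in full; the proofs are below) =====
def Claim_equal_act_on_line : Prop := ∀ (line : String) (non_repeating : Int), Dom_act_on_line line non_repeating → Pre_act_on_line line non_repeating → Spec_act_on_line line non_repeating (act_on_line line non_repeating)

-- ===== LEMMAS AND PROOFS =====

-- number of distinct characters occurring at least twice in w (what B's `dup` tracks)
def pvDup (w : List Char) : ℕ := (w.toFinset.filter (fun c => 2 ≤ w.count c)).card

lemma pvDup_cons (a : Char) (t : List Char) :
    pvDup (a :: t) = pvDup t + (if t.count a = 1 then 1 else 0) := by
  unfold pvDup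
  have hcnt : ∀ x : Char, (a :: t).count x = t.count x + (if a = x then 1 else 0) := by
    intro x; rw [List.count_cons]; split_ifs with h1 h2 h2 <;> simp_all
  have h1 : (a :: t).toFinset.filter (fun c => 2 ≤ (a :: t).count c)
      = (insert a t.toFinset).filter (fun x => 2 ≤ t.count x + (if a = x then 1 else 0)) := by
    rw [List.toFinset_cons]
    exact Finset.filter_congr (fun x _ => by rw [hcnt x])
  rw [h1]
  rcases Nat.lt_or_ge (t.count a) 1 with h0 | hge
  · have h0 : t.count a = 0 := by omega
    have ha : a ∉ t := by rw [← List.count_eq_zero]; exact h0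
    rw [Finset.filter_insert, if_neg (by simp [h0])]
    have h2 : t.toFinset.filter (fun x => 2 ≤ t.count x + (if a = x then 1 else 0))
        = t.toFinset.filter (fun c => 2 ≤ t.count c) := by
      refine Finset.filter_congr (fun x hx => ?_)
      have hxa : a ≠ x := by rintro rfl; exact ha (List.mem_toFinset.1 hx)
      simp [hxa]
    rw [h2]; simp [h0]
  · have ha : a ∈ t.toFinset := List.mem_toFinset.2 (List.count_pos_iff.1 (by omega))
    rw [Finset.insert_eq_self.2 ha]
    rcases Nat.eq_or_lt_of_le hge with h1' | h2'
    · have hc1 : t.count a = 1 := h1'.symm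
      have hset : t.toFinset.filter (fun x => 2 ≤ t.count x + (if a = x then 1 else 0))
          = insert a (t.toFinset.filter (fun c => 2 ≤ t.count c)) := by
        ext x
        by_cases hxa : x = a
        · subst hxa; simp [ha, hc1]
        · have hax : a ≠ x := fun h => hxa h.symm
          simp [Finset.mem_filter, Finset.mem_insert, hxa, hax]
      rw [hset, Finset.card_insert_of_notMem (by simp [hc1]), hc1]
      simp
    · have hset : t.toFinset.filter (fun x => 2 ≤ t.count x + (if a = x then 1 else 0))
          = t.toFinset.filter (fun c => 2 ≤ t.count c) := by
        refine Finset.filter_congr (fun x hx => ?_)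
        by_cases hxa : a = x
        · subst hxa; omega
        · simp [hxa]
      rw [hset]
      have : ¬ t.count a = 1 := by omega
      simp [this]

lemma pvDup_zero_iff (m : List Char) :
    m.filter (fun x => PySem.List.count m x > 1) = [] ↔ pvDup m = 0 := by
  unfold pvDup
  rw [List.filter_eq_nil_iff, Finset.card_eq_zero, Finset.filter_eq_empty_iff]
  simp [PySem.List.count_eq]

lemma pvDup_append_singleton (a : Char) (t : List Char) :
    pvDup (t ++ [a]) = pvDup t + (if t.count a = 1 then 1 else 0) := by
  have hperm := List.perm_append_singleton a t
  unfold pvDup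
  rw [List.toFinset_eq_of_perm _ _ hperm,
      Finset.filter_congr (fun x (_ : x ∈ (a :: t).toFinset) => by rw [hperm.count_eq])]
  exact pvDup_cons a t

-- counts after incrementing ch (the first half of B's loop body)
lemma pvCounts_inc {counts : PySem.Dict Char Int} {w : List Char}
    (h : ∀ c : Char, counts.getD c 0 = (w.count c : Int)) (ch : Char) :
    ∀ c : Char, (counts.insert ch (counts.getD ch 0 + 1)).getD c 0 = ((w ++ [ch]).count c : Int) := by
  intro c
  rw [PySem.Dict.getD_insert]
  by_cases hc : c = ch
  · subst hc; simp [h c, List.count_append]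
  · simp [hc, h c, List.count_append, Ne.symm hc]

lemma pvLoop_eq (N : ℕ) :
    ∀ (l pre : List Char) (counts : PySem.Dict Char Int) (dup : Int),
      (∀ c : Char, counts.getD c 0 = ((pre.drop (pre.length - N)).count c : Int)) →
      dup = (pvDup (pre.drop (pre.length - N)) : Int) →
      pvALoop (N : Int) (pre.drop (pre.length - N)) (PySem.List.enumerate l (pre.length : Int))
        = pvBLoop (pre ++ l) (N : Int) counts dup (PySem.List.enumerate l (pre.length : Int)) := by
  intro l
  induction l with
  | nil => intro pre counts dup _ _; rw [PySem.List.enumerate_nil]; rfl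
  | cons ch l' IH =>
    intro pre counts dup hcounts hdup
    rw [PySem.List.enumerate_cons]
    set p := pre.length with hp
    set w := pre.drop (p - N) with hw
    have hwlen : w.length = p - (p - N) := by rw [hw]; exact List.length_drop ..
    rw [pvALoop, pvBLoop]
    simp only [PySem.List.len_eq, Int.toNat_natCast, List.length_append, List.length_cons,
      List.length_nil, hwlen]
    -- invariants after inserting ch
    have hc1 : ∀ c : Char, (counts.insert ch (counts.getD ch 0 + 1)).getD c 0
        = ((w ++ [ch]).count c : Int) := pvCounts_inc hcounts ch
    have hd1 : (if counts.getD ch 0 = 1 then dup + 1 else dup) = (pvDup (w ++ [ch]) : Int) := by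
      rw [pvDup_append_singleton, hcounts ch, hdup]
      by_cases h : List.count ch w = 1
      · simp [h]
      · have h' : ((List.count ch w : Int)) ≠ 1 := by exact_mod_cast h
        simp [h, h']
    have hassoc : (pre ++ [ch]) ++ l' = pre ++ ch :: l' := by simp
    have hlenpre : (pre ++ [ch]).length = p + 1 := by simp [hp]
    have hcastp : (((p + 1 : ℕ)) : Int) = (p : Int) + 1 := by push_cast; ring
    rcases Nat.lt_or_ge p N with hpn | hpn
    · -- window not yet full: p < N
      have hw0 : p - N = 0 := by omega
      have hwpre : w = pre := by rw [hw, hw0, List.drop_zero]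
      have hdrop0 : p - (p - N) + (0 + 1) - N = 0 := by omega
      rw [hdrop0]
      simp only [List.drop_zero]
      have hBno : ¬ ((N:Int) ≤ (p:Int)) := by omega
      rw [if_neg hBno]
      have hlen : (w ++ [ch]).length = p + 1 := by simp [hwlen]; omega
      have hIH : pvALoop (↑N) (w ++ [ch]) (PySem.List.enumerate l' ((p:Int) + 1))
          = pvBLoop (pre ++ ch :: l') (↑N) (counts.insert ch (counts.getD ch 0 + 1))
              (if counts.getD ch 0 = 1 then dup + 1 else dup)
              (PySem.List.enumerate l' ((p:Int) + 1)) := by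
        have h2 := IH (pre ++ [ch]) (counts.insert ch (counts.getD ch 0 + 1))
          (if counts.getD ch 0 = 1 then dup + 1 else dup)
        rw [hlenpre, Nat.sub_eq_zero_of_le (by omega : p + 1 ≤ N), List.drop_zero,
            hassoc, hcastp] at h2
        rw [hwpre]
        exact h2 (by rw [← hwpre]; exact hc1) (by rw [← hwpre]; exact hd1)
      by_cases hlt : p + 1 < N
      · -- still too short: both continue
        rw [if_pos (by rw [hlen]; omega)]
        rw [if_neg (by rintro ⟨h1, -⟩; omega)]
        exact hIH
      · -- window just filled: p + 1 = N
        have heq : p + 1 = N := by omega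
        rw [if_neg (by rw [hlen]; omega)]
        rw [if_neg (show ¬((((w ++ [ch]).length : ℕ) : Int) > (N : Int)) by rw [hlen]; omega)]
        split
        next hA =>
          rw [if_pos ⟨by omega, show (if counts.getD ch 0 = 1 then dup + 1 else dup) = 0 by
            rw [hd1]; exact_mod_cast (pvDup_zero_iff _).1 hA⟩]
        next hA =>
          rw [if_neg (by rintro ⟨-, h2⟩
                         replace h2 : (if counts.getD ch 0 = 1 then dup + 1 else dup) = 0 := h2
                         rw [hd1] at h2
                         exact hA ((pvDup_zero_iff _).2 (by exact_mod_cast h2)))]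
          exact hIH
    · -- window full: N ≤ p, the deque slides
      have hwlenN : w.length = N := by omega
      have hdrop1 : p - (p - N) + (0 + 1) - N = 1 := by omega
      rw [hdrop1]
      have hm : w ++ [ch] = (pre ++ [ch]).drop (p - N) := by
        rw [hw, List.drop_append_of_le_length (by omega)]
      obtain ⟨hd, tl, hmc⟩ := List.exists_cons_of_ne_nil
        (show w ++ [ch] ≠ [] by simp)
      have htl : (w ++ [ch]).drop 1 = tl := by rw [hmc]; rfl
      have hByes : ((N:Int) ≤ (p:Int)) := by omega
      rw [if_pos hByes]
      have htoNat : ((p:Int) - (N:Int)).toNat = p - N := by omega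
      have hold : (pre ++ ch :: l').getD ((p:Int) - (N:Int)).toNat ' ' = hd := by
        rw [htoNat, ← hassoc]
        rw [List.getD_append _ _ _ _ (by rw [hlenpre]; omega)]
        have h4 : (pre ++ [ch]).getD (p - N) ' ' = ((w ++ [ch]).head?).getD ' ' := by
          rw [hm, List.head?_drop, List.getD_eq_getElem?_getD]
        rw [h4, hmc]
        rfl
      rw [hold]
      -- counts/dup after the removal of hd
      have hcnt_m : (w ++ [ch]).count hd = tl.count hd + 1 := by
        rw [hmc, List.count_cons]; simp
      have hc2 : ∀ c : Char,
          (((counts.insert ch (counts.getD ch 0 + 1)).insert hd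
            ((counts.insert ch (counts.getD ch 0 + 1)).getD hd 0 - 1))).getD c 0
          = (tl.count c : Int) := by
        intro c
        rw [PySem.Dict.getD_insert]
        by_cases hchd : c = hd
        · subst hchd
          rw [if_pos rfl, hc1 c, hcnt_m]
          push_cast; ring
        · rw [if_neg hchd, hc1 c, hmc, List.count_cons]
          simp [Ne.symm hchd]
      have hpv : pvDup (w ++ [ch]) = pvDup tl + (if tl.count hd = 1 then 1 else 0) := by
        rw [hmc, pvDup_cons]
      have hd2 : (if (counts.insert ch (counts.getD ch 0 + 1)).getD hd 0 = 2
            then (if counts.getD ch 0 = 1 then dup + 1 else dup) - 1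
            else (if counts.getD ch 0 = 1 then dup + 1 else dup)) = (pvDup tl : Int) := by
        rw [hd1, hc1 hd]
        by_cases h5 : tl.count hd = 1
        · rw [if_pos (by rw [hcnt_m, h5]; norm_num), hpv, if_pos h5]
          push_cast; ring
        · rw [if_neg (by rw [hcnt_m]; intro h6; exact h5 (by omega)), hpv, if_neg h5]
          push_cast; ring
      rw [htl]
      have hlentl : tl.length = N := by
        have h8 : (w ++ [ch]).length = N + 1 := by simp [hwlenN]
        rw [hmc] at h8; simpa using h8
      rw [if_neg (show ¬(((tl.length : ℕ) : Int) < (N : Int)) by rw [hlentl]; omega)]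
      rw [if_neg (show ¬(((tl.length : ℕ) : Int) > (N : Int)) by rw [hlentl]; omega)]
      have h2 := IH (pre ++ [ch])
        ((counts.insert ch (counts.getD ch 0 + 1)).insert hd
          ((counts.insert ch (counts.getD ch 0 + 1)).getD hd 0 - 1))
        (if (counts.insert ch (counts.getD ch 0 + 1)).getD hd 0 = 2
          then (if counts.getD ch 0 = 1 then dup + 1 else dup) - 1
          else (if counts.getD ch 0 = 1 then dup + 1 else dup))
      rw [hlenpre, hassoc, hcastp] at h2
      have hwin' : (pre ++ [ch]).drop (p + 1 - N) = tl := by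
        have h7 : p + 1 - N = (p - N) + 1 := by omega
        rw [h7, ← List.tail_drop, ← hm, hmc, List.tail_cons]
      rw [hwin'] at h2
      have hIH2 := h2 hc2 hd2
      split
      next hA =>
        rw [if_pos ⟨by omega, show (if (counts.insert ch (counts.getD ch 0 + 1)).getD hd 0 = 2
            then (if counts.getD ch 0 = 1 then dup + 1 else dup) - 1
            else (if counts.getD ch 0 = 1 then dup + 1 else dup)) = 0 by
          rw [hd2]; exact_mod_cast (pvDup_zero_iff _).1 hA⟩]
      next hA =>
        rw [if_neg (by rintro ⟨-, h6⟩
                       replace h6 : (if (counts.insert ch (counts.getD ch 0 + 1)).getD hd 0 = 2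
                           then (if counts.getD ch 0 = 1 then dup + 1 else dup) - 1
                           else (if counts.getD ch 0 = 1 then dup + 1 else dup)) = 0 := h6
                       rw [hd2] at h6
                       exact hA ((pvDup_zero_iff _).2 (by exact_mod_cast h6)))]
        exact hIH2

-- ===== VERDICT (by name: the statement is the Claim_ definition above) =====
theorem act_on_line_spec : Claim_equal_act_on_line := by
  intro line n _ hpre
  unfold Spec_act_on_line act_on_line act_on_line_alt
  have hn : n = ((n.toNat : ℕ) : Int) := (Int.toNat_of_nonneg hpre).symm
  rw [hn]
  have h := pvLoop_eq n.toNat line.toList [] PySem.Dict.empty 0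
    (by intro c; simp [PySem.Dict.getD_empty]) (by simp [pvDup])
  simpa using h
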